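-- pv_equiv track=rewrite | github.com/InfoCorsair/Capybaras_Recipe | mongo/tsp_conversion.py | convert_from_teaspoons
-- ===== SOURCE A (Python) =====
-- def convert_from_teaspoons(quantity):
--     units = ["gallon", "quart", "cup", "tablespoon", "teaspoon"] #pint fluid ounce
--     result = {}
--     remaining_teaspoons = quantity
--     for unit in units:
--         teaspoons_per_unit = {
--             "teaspoon": 1,
--             "tablespoon": 3,
--             "fluid ounce": 6,
--             "cup": 48,
--             "pint": 96,
--             "quart": 192,
--             "gallon": 768
--         }
--         unit_quantity = remaining_teaspoons // teaspoons_per_unit[unit]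
--         if unit_quantity:
--             result[unit] = unit_quantity
--             remaining_teaspoons %= teaspoons_per_unit[unit]
--     return result
-- ===== SOURCE B (Python) =====
-- def convert_from_teaspoons(quantity):
--     # Mixed-radix digit extraction: each unit's count is a closed form of quantity,
--     # no loop and no running remainder.
--     counts = {
--         "gallon": quantity // 768,
--         "quart": quantity // 192 % 4,
--         "cup": quantity // 48 % 4,
--         "tablespoon": quantity // 3 % 16,
--         "teaspoon": quantity % 3,
--     }
--     return {unit: c for unit, c in counts.items() if c}
-- ===== Notes on version B (the rewrite author's own statement) =====
-- stated objective: alternative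
-- what changed: B replaces A's loop with a threaded remainder and per-iteration dict lookup by loop-free mixed-radix digit extraction: each unit's count is a closed form of the original quantity (quantity // factor % radix), then a comprehension keeps the nonzero counts.
import Mathlib
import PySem

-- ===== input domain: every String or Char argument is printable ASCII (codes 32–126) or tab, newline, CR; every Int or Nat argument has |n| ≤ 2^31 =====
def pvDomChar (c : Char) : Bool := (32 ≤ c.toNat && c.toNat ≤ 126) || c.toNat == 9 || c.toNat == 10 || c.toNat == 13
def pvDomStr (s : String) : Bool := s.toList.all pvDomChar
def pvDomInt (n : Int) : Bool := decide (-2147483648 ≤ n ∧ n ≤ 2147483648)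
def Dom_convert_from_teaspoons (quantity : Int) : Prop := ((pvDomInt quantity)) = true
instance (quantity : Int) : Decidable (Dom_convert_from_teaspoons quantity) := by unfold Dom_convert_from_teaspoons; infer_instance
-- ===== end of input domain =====

-- B replaces A's remainder-threading loop by loop-free mixed-radix digit extraction:
-- each unit's count is a closed form quantity // factor % radix (objective: alternative).

-- ===== PORT A =====
-- A's loop threads state (result dict, remaining_teaspoons); teaspoons_per_unit[unit] always
-- hits an existing key, so getD's default 0 is never used (exact).
def convert_from_teaspoons (quantity : Int) : List (String × Int) :=
  let units : List String := ["gallon", "quart", "cup", "tablespoon", "teaspoon"]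
  let st :=
    units.foldl (fun (st : PySem.Dict String Int × Int) unit =>
      let teaspoons_per_unit : PySem.Dict String Int :=
        PySem.Dict.ofList [("teaspoon", 1), ("tablespoon", 3), ("fluid ounce", 6),
                           ("cup", 48), ("pint", 96), ("quart", 192), ("gallon", 768)]
      let unit_quantity := PySem.Int.floordiv st.2 (teaspoons_per_unit.getD unit 0)
      if unit_quantity ≠ 0 then
        (st.1.insert unit unit_quantity, PySem.Int.mod st.2 (teaspoons_per_unit.getD unit 0))
      else st)
      (PySem.Dict.empty, quantity)
  st.1.items

-- ===== PORT B =====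
-- Source B builds the dict of five closed-form counts, then the comprehension keeps nonzero ones.
def convert_from_teaspoons_alt (quantity : Int) : List (String × Int) :=
  let counts : PySem.Dict String Int :=
    PySem.Dict.ofList
      [("gallon", PySem.Int.floordiv quantity 768),
       ("quart", PySem.Int.mod (PySem.Int.floordiv quantity 192) 4),
       ("cup", PySem.Int.mod (PySem.Int.floordiv quantity 48) 4),
       ("tablespoon", PySem.Int.mod (PySem.Int.floordiv quantity 3) 16),
       ("teaspoon", PySem.Int.mod quantity 3)]
  (counts.items.foldl (fun (d : PySem.Dict String Int) uc =>
      if uc.2 ≠ 0 then d.insert uc.1 uc.2 else d) PySem.Dict.empty).items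

-- ===== PRECONDITION & SPEC =====
def Spec_convert_from_teaspoons (quantity : Int) (out : List (String × Int)) : Prop := out = convert_from_teaspoons_alt quantity
instance (quantity : Int) (out : List (String × Int)) : Decidable (Spec_convert_from_teaspoons quantity out) := by unfold Spec_convert_from_teaspoons; infer_instance

-- ===== CLAIM (what is proved, stated in full; the proofs are below) =====
def Claim_equal_convert_from_teaspoons : Prop := ∀ (quantity : Int), Dom_convert_from_teaspoons quantity → Spec_convert_from_teaspoons quantity (convert_from_teaspoons quantity)

-- ===== LEMMAS AND PROOFS =====

-- If the floor quotient by a positive divisor is 0, the value is its own remainder.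
lemma mod_self_of_floordiv_zero (a f : Int) (hf : 0 < f)
    (h : PySem.Int.floordiv a f = 0) : PySem.Int.mod a f = a := by
  rw [PySem.Int.mod_eq_emod_of_pos hf]
  rw [PySem.Int.floordiv_eq_iff_of_pos hf] at h
  exact Int.emod_eq_of_lt (by omega) (by omega)

-- The five digit identities: A's nested-mod quotients are B's closed forms.
lemma digit_quart (q : Int) :
    PySem.Int.floordiv (PySem.Int.mod q 768) 192 = PySem.Int.mod (PySem.Int.floordiv q 192) 4 := by
  rw [PySem.Int.mod_eq_emod_of_pos (by norm_num : (0:Int) < 768),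
      PySem.Int.floordiv_eq_ediv_of_pos (by norm_num : (0:Int) < 192),
      PySem.Int.floordiv_eq_ediv_of_pos (by norm_num : (0:Int) < 192),
      PySem.Int.mod_eq_emod_of_pos (by norm_num : (0:Int) < 4)]
  omega

lemma digit_cup (q : Int) :
    PySem.Int.floordiv (PySem.Int.mod (PySem.Int.mod q 768) 192) 48
      = PySem.Int.mod (PySem.Int.floordiv q 48) 4 := by
  rw [PySem.Int.mod_eq_emod_of_pos (by norm_num : (0:Int) < 768),
      PySem.Int.mod_eq_emod_of_pos (by norm_num : (0:Int) < 192),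
      PySem.Int.floordiv_eq_ediv_of_pos (by norm_num : (0:Int) < 48),
      PySem.Int.floordiv_eq_ediv_of_pos (by norm_num : (0:Int) < 48),
      PySem.Int.mod_eq_emod_of_pos (by norm_num : (0:Int) < 4)]
  omega

lemma digit_tbsp (q : Int) :
    PySem.Int.floordiv (PySem.Int.mod (PySem.Int.mod (PySem.Int.mod q 768) 192) 48) 3
      = PySem.Int.mod (PySem.Int.floordiv q 3) 16 := by
  rw [PySem.Int.mod_eq_emod_of_pos (by norm_num : (0:Int) < 768),
      PySem.Int.mod_eq_emod_of_pos (by norm_num : (0:Int) < 192),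
      PySem.Int.mod_eq_emod_of_pos (by norm_num : (0:Int) < 48),
      PySem.Int.floordiv_eq_ediv_of_pos (by norm_num : (0:Int) < 3),
      PySem.Int.floordiv_eq_ediv_of_pos (by norm_num : (0:Int) < 3),
      PySem.Int.mod_eq_emod_of_pos (by norm_num : (0:Int) < 16)]
  omega

lemma digit_tsp (q : Int) :
    PySem.Int.floordiv (PySem.Int.mod (PySem.Int.mod (PySem.Int.mod (PySem.Int.mod q 768) 192) 48) 3) 1
      = PySem.Int.mod q 3 := by
  rw [PySem.Int.mod_eq_emod_of_pos (by norm_num : (0:Int) < 768),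
      PySem.Int.mod_eq_emod_of_pos (by norm_num : (0:Int) < 192),
      PySem.Int.mod_eq_emod_of_pos (by norm_num : (0:Int) < 48),
      PySem.Int.mod_eq_emod_of_pos (by norm_num : (0:Int) < 3),
      PySem.Int.floordiv_eq_ediv_of_pos (by norm_num : (0:Int) < 1),
      PySem.Int.mod_eq_emod_of_pos (by norm_num : (0:Int) < 3)]
  omega

-- A's loop body over (unit, factor) pairs (the port's dict lookups reduce to these factors).
def stepA (st : PySem.Dict String Int × Int) (uf : String × Int) : PySem.Dict String Int × Int :=
  if PySem.Int.floordiv st.2 uf.2 ≠ 0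
    then (st.1.insert uf.1 (PySem.Int.floordiv st.2 uf.2), PySem.Int.mod st.2 uf.2)
    else st

-- B's conditional insert.
def ins (d : PySem.Dict String Int) (uc : String × Int) : PySem.Dict String Int :=
  if uc.2 ≠ 0 then d.insert uc.1 uc.2 else d

lemma portA_eq (q : Int) :
    convert_from_teaspoons q =
      (([("gallon", (768:Int)), ("quart", 192), ("cup", 48), ("tablespoon", 3),
         ("teaspoon", 1)]).foldl stepA (PySem.Dict.empty, q)).1.items := rfl

lemma portB_eq (q : Int) :
    convert_from_teaspoons_alt q =
      (([("gallon", PySem.Int.floordiv q 768),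
         ("quart", PySem.Int.mod (PySem.Int.floordiv q 192) 4),
         ("cup", PySem.Int.mod (PySem.Int.floordiv q 48) 4),
         ("tablespoon", PySem.Int.mod (PySem.Int.floordiv q 3) 16),
         ("teaspoon", PySem.Int.mod q 3)]).foldl ins PySem.Dict.empty).items := rfl

-- One A-step, with the remaining always reduced mod f.
lemma stepA_good (d : PySem.Dict String Int) (r : Int) (u : String) (f : Int) (hf : 0 < f) :
    stepA (d, r) (u, f) = (ins d (u, PySem.Int.floordiv r f), PySem.Int.mod r f) := by
  unfold stepA ins
  simp only []
  split_ifs with h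
  · rfl
  · exact Prod.ext rfl ((mod_self_of_floordiv_zero r f hf (not_not.mp h)).symm)

-- ===== VERDICT (by name: the statement is the Claim_ definition above) =====
theorem convert_from_teaspoons_spec : Claim_equal_convert_from_teaspoons := by
  intro q _
  unfold Spec_convert_from_teaspoons
  rw [portA_eq, portB_eq]
  simp only [List.foldl_cons, List.foldl_nil]
  rw [stepA_good _ _ _ _ (by norm_num : (0:Int) < 768),
      stepA_good _ _ _ _ (by norm_num : (0:Int) < 192),
      stepA_good _ _ _ _ (by norm_num : (0:Int) < 48),
      stepA_good _ _ _ _ (by norm_num : (0:Int) < 3),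
      stepA_good _ _ _ _ (by norm_num : (0:Int) < 1)]
  rw [digit_quart, digit_cup, digit_tbsp, digit_tsp]
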